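-- pv_equiv track=rewrite | github.com/JWriter20/NLP_Final_project | n-gram-model.py | replace_quotes
-- ===== SOURCE A (Python) =====
-- def replace_quotes(data):
--     isQuoteStart = True
--     newData = []
--     for i, character in enumerate(data):
--         if character == '\"':
--             if isQuoteStart:
--                 newData.append('startquote')
--             else:
--                 newData.append('endquote')
--
--             isQuoteStart = not isQuoteStart
--         newData.append(character)
--     return "".join(newData)
-- ===== SOURCE B (Python) =====
-- def replace_quotes(data):
--     parts = data.split('"')
--     out = [parts[0]]
--     for k, part in enumerate(parts[1:]):
--         out.append(('startquote' if k % 2 == 0 else 'endquote') + '"' + part)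
--     return ''.join(out)
-- ===== Notes on version B (the rewrite author's own statement) =====
-- stated objective: simpler
-- what changed: B replaces A's character-by-character scan with a boolean toggle by a single split on the quote character followed by interleaving alternating startquote/endquote tags before each later segment, rebuilt segment-wise with join.
import Mathlib
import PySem

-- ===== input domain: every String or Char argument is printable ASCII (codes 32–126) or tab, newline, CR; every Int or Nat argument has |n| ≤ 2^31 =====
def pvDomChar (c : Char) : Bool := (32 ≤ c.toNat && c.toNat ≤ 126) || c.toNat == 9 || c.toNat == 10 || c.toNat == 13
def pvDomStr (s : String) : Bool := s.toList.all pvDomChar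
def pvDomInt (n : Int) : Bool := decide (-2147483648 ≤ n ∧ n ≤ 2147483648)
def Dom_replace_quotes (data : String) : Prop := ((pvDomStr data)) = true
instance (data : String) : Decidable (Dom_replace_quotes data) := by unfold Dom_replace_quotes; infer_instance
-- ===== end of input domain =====

-- B tags quotes by splitting on '"' and interleaving alternating tags over whole
-- segments, instead of A's char-by-char scan with a toggle (objective: simpler).

-- ===== PORT A =====
-- A: scan characters, toggle isQuoteStart, append tag before each '"', join.
-- loop body of A (tag-then-toggle on '"', then always append the character)
def rqStep (st : Bool × List (List Char)) (c : Char) : Bool × List (List Char) :=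
  let st2 := if c == '"' then
      (!st.1, st.2 ++ [if st.1 then "startquote".toList else "endquote".toList])
    else st
  (st2.1, st2.2 ++ [[c]])

def replace_quotes (data : String) : String :=
  let r := data.toList.foldl rqStep (true, ([] : List (List Char)))
  String.ofList r.2.flatten   -- "".join(newData)

-- ===== PORT B =====
-- B: parts = data.split('"'); emit parts[0], then tag+'"'+part per later part; ''.join.
def replace_quotes_alt (data : String) : String :=
  match PySem.Chars.splitOn data.toList ['"'] with
  | [] => String.ofList []  -- unreachable: split never returns an empty list
  | p0 :: rest =>
      String.ofList ((p0 :: (PySem.List.enumerate rest).map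
        (fun kp => (if PySem.Int.mod kp.1 2 == 0 then "startquote".toList
                    else "endquote".toList) ++ '"' :: kp.2)).flatten)

-- ===== PRECONDITION & SPEC =====
def Spec_replace_quotes (data : String) (out : String) : Prop := out = replace_quotes_alt data
instance (data : String) (out : String) : Decidable (Spec_replace_quotes data out) := by unfold Spec_replace_quotes; infer_instance

-- ===== CLAIM (what is proved, stated in full; the proofs are below) =====
def Claim_equal_replace_quotes : Prop := ∀ (data : String), Dom_replace_quotes data → Spec_replace_quotes data (replace_quotes data)

-- ===== LEMMAS AND PROOFS =====

-- reference recursion: A's output character list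
def rqGo (b : Bool) : List Char → List Char
  | [] => []
  | c :: cs =>
      if c = '"' then (if b then "startquote".toList else "endquote".toList) ++ c :: rqGo (!b) cs
      else c :: rqGo b cs

-- reference split on '"'
def rqSplit : List Char → List (List Char)
  | [] => [[]]
  | c :: cs => if c = '"' then [] :: rqSplit cs else (rqSplit cs).modifyHead (c :: ·)

-- reference interleave of B's tail parts
def rqInter (b : Bool) : List (List Char) → List Char
  | [] => []
  | p :: ps =>
      ((if b then "startquote".toList else "endquote".toList) ++ '"' :: p) ++ rqInter (!b) ps

theorem rqSplit_ne_nil (cs : List Char) : rqSplit cs ≠ [] := by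
  induction cs with
  | nil => simp [rqSplit]
  | cons c cs ih =>
    simp only [rqSplit]
    split_ifs
    · simp
    · cases h : rqSplit cs with
      | nil => exact absurd h ih
      | cons q qs => simp [List.modifyHead]

theorem rqA (cs : List Char) : ∀ (b : Bool) (acc : List (List Char)),
    (cs.foldl rqStep (b, acc)).2.flatten = acc.flatten ++ rqGo b cs := by
  induction cs with
  | nil => intro b acc; simp [rqGo]
  | cons c cs ih =>
    intro b acc
    rw [List.foldl_cons, ← Prod.mk.eta (p := rqStep (b, acc) c), ih]
    by_cases hc : c = '"'
    · subst hc
      simp [rqStep, rqGo, List.flatten_append]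
    · have hc' : (c == '"') = false := by simp [hc]
      simp [rqStep, hc', rqGo, hc, List.flatten_append]

theorem rqGoSplit (fuel : Nat) : ∀ (l cur : List Char) (acc : List (List Char)),
    l.length < fuel →
    PySem.Chars.splitOn.go ['"'] fuel l cur acc
      = acc.reverse ++ (rqSplit l).modifyHead (fun p => cur.reverse ++ p) := by
  induction fuel with
  | zero => intro l cur acc h; omega
  | succ f ih =>
    intro l cur acc h
    cases l with
    | nil =>
      simp [PySem.Chars.splitOn.go, rqSplit, List.modifyHead]
    | cons c rest =>
      by_cases hc : c = '"'
      · subst hc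
        have hpre : (['"'] : List Char).isPrefixOf ('"' :: rest) = true := by
          simp [List.isPrefixOf]
        rw [PySem.Chars.splitOn.go, if_pos hpre]
        simp only [List.length_cons] at h
        rw [ih _ _ _ (by simpa using Nat.lt_of_succ_lt_succ h)]
        cases hrs : rqSplit rest with
        | nil => exact absurd hrs (rqSplit_ne_nil rest)
        | cons q qs => simp [rqSplit, hrs, List.modifyHead]
      · have hpre : (['"'] : List Char).isPrefixOf (c :: rest) = false := by
          simp only [List.isPrefixOf, Bool.and_eq_false_iff, beq_eq_false_iff_ne, ne_eq]
          exact Or.inl fun hh => hc hh.symm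
        rw [PySem.Chars.splitOn.go, if_neg (by simp [hpre])]
        simp only [List.length_cons] at h
        rw [ih _ _ _ (Nat.lt_of_succ_lt_succ h)]
        simp only [rqSplit, if_neg hc]
        cases hs : rqSplit rest with
        | nil => exact absurd hs (rqSplit_ne_nil rest)
        | cons q qs => simp [List.modifyHead]

theorem rqSplitOn (cs : List Char) : PySem.Chars.splitOn cs ['"'] = rqSplit cs := by
  rw [PySem.Chars.splitOn, rqGoSplit (cs.length + 1) cs [] [] (by omega)]
  cases hs : rqSplit cs with
  | nil => exact absurd hs (rqSplit_ne_nil cs)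
  | cons q qs => simp [List.modifyHead]

theorem rqEnum (ps : List (List Char)) : ∀ (k : Int), 0 ≤ k →
    ((PySem.List.enumerate ps k).map
      (fun kp => (if PySem.Int.mod kp.1 2 == 0 then "startquote".toList
                  else "endquote".toList) ++ '"' :: kp.2)).flatten
      = rqInter (decide (k % 2 = 0)) ps := by
  induction ps with
  | nil => intro k hk; simp [PySem.List.enumerate, rqInter]
  | cons p ps ih =>
    intro k hk
    rw [PySem.List.enumerate]
    simp only [List.map_cons, List.flatten_cons]
    rw [ih (k + 1) (by omega)]
    have hmod : PySem.Int.mod k 2 = k % 2 := by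
      simp [PySem.Int.mod, Int.fmod_eq_emod]
    have hpar : rqInter (decide ((k + 1) % 2 = 0)) ps
        = rqInter (!decide (k % 2 = 0)) ps := by
      by_cases h : k % 2 = 0
      · have h1 : ¬ (k + 1) % 2 = 0 := by omega
        simp [h, h1]
      · have h1 : (k + 1) % 2 = 0 := by omega
        simp [h, h1]
    rw [hpar, hmod]
    by_cases h : k % 2 = 0 <;>
      simp [rqInter, h]

theorem rqB (cs : List Char) : ∀ (b : Bool) (p0 : List Char) (ps : List (List Char)),
    rqSplit cs = p0 :: ps → p0 ++ rqInter b ps = rqGo b cs := by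
  induction cs with
  | nil =>
    intro b p0 ps h
    simp only [rqSplit] at h
    cases h
    simp [rqInter, rqGo]
  | cons c cs ih =>
    intro b p0 ps h
    by_cases hc : c = '"'
    · subst hc
      simp only [rqSplit, if_true] at h
      cases h
      cases hs : rqSplit cs with
      | nil => exact absurd hs (rqSplit_ne_nil cs)
      | cons q qs =>
        simp only [rqInter, rqGo, List.nil_append]
        rw [← ih (!b) q qs hs]
        simp
    · simp only [rqSplit, if_neg hc] at h
      cases hs : rqSplit cs with
      | nil => exact absurd hs (rqSplit_ne_nil cs)
      | cons q qs =>
        rw [hs] at h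
        simp only [List.modifyHead] at h
        injection h with h1 h2
        subst h2
        subst h1
        simp only [rqGo, if_neg hc]
        rw [← ih b q qs hs]
        simp

-- ===== VERDICT (by name: the statement is the Claim_ definition above) =====
theorem replace_quotes_spec : Claim_equal_replace_quotes := by
  intro data _
  unfold Spec_replace_quotes replace_quotes replace_quotes_alt
  rw [rqSplitOn]
  cases hs : rqSplit data.toList with
  | nil => exact absurd hs (rqSplit_ne_nil data.toList)
  | cons p0 ps =>
    simp only [List.flatten_cons]
    rw [rqEnum ps 0 (by norm_num)]
    rw [rqA data.toList true []]
    have h0 : decide ((0 : Int) % 2 = 0) = true := by decide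
    rw [h0]
    rw [rqB data.toList true p0 ps hs]
    simp
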